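-- pv_equiv track=rewrite | github.com/yassataiseer/competitive-programming | 2009-CCC/s1.py | solve
-- ===== SOURCE A (Python) =====
-- def solve(min_value,max_value):
--     final_answer = 0
--     answers = []
--     while min_value<max_value:
--
--         if min_value*min_value in answers and min_value*min_value<max_value:
--             final_answer+=1
--         answers.append(min_value*min_value)
--         if min_value*min_value*min_value in answers and min_value*min_value*min_value<max_value:
--             final_answer+=1
--         answers.append(min_value*min_value*min_value)
--         min_value+=1
--     return final_answer
-- ===== SOURCE B (Python) =====
-- def solve(min_value, max_value):
--     values = sorted(v for i in range(min_value, max_value)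
--                     for v in (i * i, i * i * i) if v < max_value)
--     return sum(1 for x, y in zip(values, values[1:]) if x == y)
-- ===== Notes on version B (the rewrite author's own statement) =====
-- stated objective: alternative
-- what changed: B stages the work: it generates the kept values (those below max_value), sorts them, and counts adjacent equal pairs in the sorted list, instead of A's single pass with a linear membership scan over the growing answers list.
import Mathlib
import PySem

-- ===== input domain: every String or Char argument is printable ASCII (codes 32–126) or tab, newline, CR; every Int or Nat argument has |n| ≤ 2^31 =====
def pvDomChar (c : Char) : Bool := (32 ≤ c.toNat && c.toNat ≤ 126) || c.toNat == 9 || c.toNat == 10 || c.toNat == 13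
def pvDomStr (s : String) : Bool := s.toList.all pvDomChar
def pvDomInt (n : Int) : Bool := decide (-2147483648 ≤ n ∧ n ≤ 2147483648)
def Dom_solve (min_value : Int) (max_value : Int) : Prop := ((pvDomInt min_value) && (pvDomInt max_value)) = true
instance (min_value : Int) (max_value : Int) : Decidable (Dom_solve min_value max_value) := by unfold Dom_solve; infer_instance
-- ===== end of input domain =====

-- B replaces A's one-pass membership-scan counting by three staged passes:
-- generate the kept values (< max_value), sort them, count adjacent equal pairs (objective: alternative).

-- ===== PORT A =====
-- literal transliteration of A's while loop: answers list, membership scan, counter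
def solveLoopA (min_value : Int) (max_value : Int) (final_answer : Int) (answers : List Int) : Int :=
  if _h : min_value < max_value then
    let sq := min_value * min_value
    let fa1 := if sq ∈ answers ∧ sq < max_value then final_answer + 1 else final_answer
    let ans1 := answers ++ [sq]
    let cb := min_value * min_value * min_value
    let fa2 := if cb ∈ ans1 ∧ cb < max_value then fa1 + 1 else fa1
    let ans2 := ans1 ++ [cb]
    solveLoopA (min_value + 1) max_value fa2 ans2
  else final_answer
termination_by (max_value - min_value).toNat
decreasing_by omega

def solve (min_value : Int) (max_value : Int) : Int :=
  solveLoopA min_value max_value 0 []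

-- ===== PORT B =====
def solve_alt (min_value : Int) (max_value : Int) : Int :=
  let values := PySem.List.sorted
    ((PySem.List.pyRange min_value max_value 1).flatMap
      (fun i => [i * i, i * i * i].filter (fun v => decide (v < max_value))))
    (fun x => x) false
  ((values.zip (PySem.List.slice values (some 1) none)).countP (fun p => p.1 == p.2) : Int)

-- ===== PRECONDITION & SPEC =====
def Spec_solve (min_value : Int) (max_value : Int) (out : Int) : Prop := out = solve_alt min_value max_value
instance (min_value : Int) (max_value : Int) (out : Int) : Decidable (Spec_solve min_value max_value out) := by unfold Spec_solve; infer_instance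

-- ===== CLAIM (what is proved, stated in full; the proofs are below) =====
def Claim_equal_solve : Prop := ∀ (min_value : Int) (max_value : Int), Dom_solve min_value max_value → Spec_solve min_value max_value (solve min_value max_value)

-- ===== LEMMAS AND PROOFS =====

-- the sequence of values A appends: i*i, i*i*i for i in [a, b)
def pvStream (a b : Int) : List Int :=
  (PySem.List.pyRange a b 1).flatMap (fun i => [i * i, i * i * i])

-- the duplicate count A accumulates over a value stream
def pvDup (maxv : Int) (ans : List Int) : List Int → Int
  | [] => 0
  | v :: t => (if v ∈ ans ∧ v < maxv then 1 else 0) + pvDup maxv (ans ++ [v]) t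

-- B's aggregation: adjacent equal pairs of a list
def pvAdj (l : List Int) : Nat := (l.zip l.tail).countP (fun p => p.1 == p.2)

-- appending one element grows dedup iff the element is new
theorem pvDedupAppend (l : List Int) (v : Int) :
    (l ++ [v]).dedup.length = if v ∈ l then l.dedup.length else l.dedup.length + 1 := by
  induction l with
  | nil => simp
  | cons x t ih =>
    by_cases hxt : x ∈ t
    · have hx' : x ∈ t ++ [v] := List.mem_append_left _ hxt
      rw [List.cons_append, List.dedup_cons_of_mem hx', ih, List.dedup_cons_of_mem hxt]
      by_cases hv : v ∈ t
      · simp [hv, List.mem_cons.mpr (Or.inr hv)]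
      · have : v ∈ x :: t ↔ v = x := by simp [hv]
        by_cases hvx : v = x
        · simp [hvx, hxt]
        · simp [hv, hvx]
    · by_cases hxv : x = v
      · subst hxv
        have hx' : x ∈ t ++ [x] := by simp
        rw [List.cons_append, List.dedup_cons_of_mem hx', ih, List.dedup_cons_of_notMem hxt]
        simp [hxt]
      · have hx' : x ∉ t ++ [v] := by simp [hxt, hxv]
        have hvx : ¬ v = x := fun h => hxv h.symm
        rw [List.cons_append, List.dedup_cons_of_notMem hx', List.dedup_cons_of_notMem hxt]
        by_cases hv : v ∈ t <;> simp [ih, hv, hvx]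

-- A's loop counts, for each position, whether the kept value occurred before:
-- it equals (number of kept occurrences) - (number of distinct kept values)
theorem pvDup_eq (maxv : Int) (l : List Int) : ∀ ans : List Int,
    pvDup maxv ans l =
      ((((ans ++ l).filter (fun v => decide (v < maxv))).length : Int) -
        (((ans ++ l).filter (fun v => decide (v < maxv))).dedup.length : Int)) -
      ((((ans.filter (fun v => decide (v < maxv))).length : Int) -
        ((ans.filter (fun v => decide (v < maxv))).dedup.length : Int)) : Int) := by
  induction l with
  | nil => intro ans; simp [pvDup]
  | cons v t ih =>
    intro ans
    have hassoc : ans ++ v :: t = (ans ++ [v]) ++ t := by simp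
    rw [pvDup, ih (ans ++ [v]), hassoc]
    have hfil : (ans ++ [v]).filter (fun v => decide (v < maxv)) =
        ans.filter (fun v => decide (v < maxv)) ++ (if v < maxv then [v] else []) := by
      rw [List.filter_append]
      by_cases h : v < maxv <;> simp [h]
    by_cases h : v < maxv
    · have hmem : v ∈ ans.filter (fun v => decide (v < maxv)) ↔ v ∈ ans := by
        simp [List.mem_filter, h]
      rw [hfil]
      simp only [h, if_pos]
      rw [pvDedupAppend]
      by_cases hva : v ∈ ans
      · simp only [hva, hmem.mpr hva, and_self, if_pos, List.length_append,
          List.length_cons, List.length_nil]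
        push_cast
        omega
      · have hnm : v ∉ ans.filter (fun v => decide (v < maxv)) := fun hc => hva (hmem.mp hc)
        simp only [hva, false_and, if_neg, not_false_iff, hnm, List.length_append,
          List.length_cons, List.length_nil]
        push_cast
        omega
    · rw [hfil]
      simp only [h, if_neg, not_false_iff, List.append_nil]
      simp [h]

-- adjacent equal pairs of a (≤)-sorted list = length - number of distinct values
theorem pvAdj_sorted : ∀ l : List Int, l.Pairwise (· ≤ ·) →
    (pvAdj l : Int) = (l.length : Int) - (l.dedup.length : Int)
  | [] => by intro _; simp [pvAdj]
  | [x] => by intro _; simp [pvAdj]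
  | x :: y :: t => by
    intro hp
    have hp' : (y :: t).Pairwise (fun a b : Int => a ≤ b) := hp.tail
    have ih := pvAdj_sorted (y :: t) hp'
    have hstep : pvAdj (x :: y :: t) = (if x = y then 1 else 0) + pvAdj (y :: t) := by
      simp only [pvAdj, List.tail_cons, List.zip_cons_cons, List.countP_cons]
      by_cases hxy : x = y
      · simp [hxy]
        omega
      · simp [hxy]
    have hcast : (pvAdj (x :: y :: t) : Int) =
        (if x = y then (1 : Int) else 0) + (pvAdj (y :: t) : Int) := by
      rw [hstep]
      by_cases hxy : x = y
      · simp [hxy]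
      · simp [hxy]
    by_cases hxy : x = y
    · have hmem : x ∈ y :: t := by simp [hxy]
      rw [hcast, ih, List.dedup_cons_of_mem hmem]
      simp only [hxy, if_pos, List.length_cons]
      push_cast
      omega
    · have hxley : x ≤ y := (List.pairwise_cons.mp hp).1 y (by simp)
      have hnm : x ∉ y :: t := by
        intro hm
        rcases List.mem_cons.mp hm with h1 | h2
        · exact hxy h1
        · have hyx : y ≤ x := (List.pairwise_cons.mp hp').1 x h2
          exact hxy (le_antisymm hxley hyx)
      rw [hcast, ih, List.dedup_cons_of_notMem hnm]
      simp only [hxy, if_neg, not_false_iff, List.length_cons]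
      push_cast
      omega

-- filter distributes through flatMap
theorem pvFilterFlatMap (l : List Int) (f : Int → List Int) (p : Int → Bool) :
    (l.flatMap f).filter p = l.flatMap (fun x => (f x).filter p) := by
  induction l with
  | nil => simp
  | cons x t ih => simp [List.flatMap_cons, List.filter_append, ih]

-- A's loop in terms of the value stream
theorem solveLoopA_eq (b : Int) : ∀ (a fa : Int) (ans : List Int),
    solveLoopA a b fa ans = fa + pvDup b ans (pvStream a b) := by
  intro a
  induction hn : (b - a).toNat generalizing a with
  | zero =>
    intro fa ans
    have hab : ¬ a < b := by omega
    rw [solveLoopA]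
    simp [hab, pvStream, PySem.List.pyRange, pvDup]
  | succ n ih =>
    intro fa ans
    have hab : a < b := by omega
    rw [solveLoopA]
    simp only [hab, dif_pos]
    rw [ih (a + 1) (by omega)]
    have hstream : pvStream a b = a * a :: a * a * a :: pvStream (a + 1) b := by
      rw [pvStream, pvStream, PySem.List.pyRange_one_cons hab]
      simp [List.flatMap_cons]
    rw [hstream, pvDup, pvDup]
    split_ifs <;> omega

-- B computes pvAdj of the sorted kept stream
theorem solve_alt_eq (a b : Int) :
    solve_alt a b =
      (pvAdj (PySem.List.sorted ((pvStream a b).filter (fun v => decide (v < b)))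
        (fun x => x) false) : Int) := by
  unfold solve_alt pvAdj
  simp only [PySem.List.slice_from_one, ← pvFilterFlatMap, pvStream]

-- ===== VERDICT (by name: the statement is the Claim_ definition above) =====
theorem solve_spec : Claim_equal_solve := by
  intro a b _
  unfold Spec_solve
  rw [solve, solveLoopA_eq, solve_alt_eq]
  set L := (pvStream a b).filter (fun v => decide (v < b)) with hL
  rw [pvAdj_sorted _ (PySem.List.sorted_pairwise L (fun x => x) )]
  have hperm : (PySem.List.sorted L (fun x => x) false).Perm L :=
    PySem.List.sorted_perm L (fun x => x) false
  rw [hperm.length_eq, hperm.dedup.length_eq]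
  rw [pvDup_eq, hL]
  simp
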